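-- pv_equiv track=rewrite | github.com/LALITHA-14/codemind-python | Adam_Number.py | checkAdamOrNot
-- ===== SOURCE A (Python) =====
-- def checkAdamOrNot(N):
--     # code here
--     s=N*N
--     rev=0
--     while(N!=0):
--         r=N%10
--         rev=(rev*10)+r
--         N=N//10
--     a=rev*rev
--     av=a
--     rs=0
--     while(a!=0):
--         p=a%10
--         rs=(rs*10)+p
--         a=a//10
--     if s==rs:
--         return "YES"
--     else:
--         return "NO"
-- ===== SOURCE B (Python) =====
-- def checkAdamOrNot(N):
--     def reverse10(n):
--         # positional closed form: digit count k, then sum digits times mirrored powers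
--         k = 1
--         while 10 ** k <= n:
--             k += 1
--         return sum(n // 10 ** i % 10 * 10 ** (k - 1 - i) for i in range(k))
--     r = reverse10(N)
--     return "YES" if N * N == reverse10(r * r) else "NO"
-- ===== Notes on version B (the rewrite author's own statement) =====
-- stated objective: alternative
-- what changed: B replaces A's two destructive divmod accumulator while-loops with a closed-form positional formulation: find the digit count k, then sum n // 10**i % 10 * 10**(k-1-i) over range(k); the precondition excludes N < 0, where A's while-loop never terminates.
import Mathlib
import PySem

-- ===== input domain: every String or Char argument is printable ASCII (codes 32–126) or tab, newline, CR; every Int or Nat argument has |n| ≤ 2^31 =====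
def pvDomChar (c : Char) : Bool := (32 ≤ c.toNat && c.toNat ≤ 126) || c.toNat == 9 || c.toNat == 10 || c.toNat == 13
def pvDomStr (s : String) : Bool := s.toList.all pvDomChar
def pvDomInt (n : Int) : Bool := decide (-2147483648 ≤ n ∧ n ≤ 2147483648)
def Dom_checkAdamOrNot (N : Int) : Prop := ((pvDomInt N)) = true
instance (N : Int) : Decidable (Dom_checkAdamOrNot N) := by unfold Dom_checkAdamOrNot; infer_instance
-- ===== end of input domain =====

-- B replaces A's two divmod-accumulator while-loops with a closed-form positional sum
-- (digit count, then digits times mirrored powers of 10): an alternative algorithm, same cost class.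
-- A never terminates for N < 0; Pre_ restricts to 0 ≤ N, exactly where the Python A returns.


-- ===== PORT A =====
-- A's 'while N != 0: r = N % 10; rev = rev*10 + r; N = N // 10'.
-- The guard '0 < n' (instead of 'n ≠ 0') only makes the recursion total: for the 0 ≤ N
-- inputs Pre_ admits every loop value is nonnegative, so the guards coincide.
def pvRevLoop (n rev : Int) : Int :=
  if 0 < n then pvRevLoop (PySem.Int.floordiv n 10) (rev * 10 + PySem.Int.mod n 10) else rev
termination_by n.toNat
decreasing_by
  rename_i h
  rw [PySem.Int.floordiv_eq_ediv_of_pos (by norm_num)]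
  omega

def checkAdamOrNot (N : Int) : String :=
  let s := N * N
  let rev := pvRevLoop N 0
  let a := rev * rev
  let rs := pvRevLoop a 0
  if s = rs then "YES" else "NO"

-- ===== PORT B =====
-- Source B's 'k = 1; while 10 ** k <= n: k += 1' (k is always a positive integer, kept as Nat internally)
def pvCountK (n : Int) (k : Nat) : Int :=
  if (10:Int) ^ k ≤ n then pvCountK n (k + 1) else (k : Int)
termination_by (n + 1 - (10:Int) ^ k).toNat
decreasing_by
  rename_i h
  have h1 : (10:Int) ^ k < 10 ^ (k + 1) := by
    have hp : (0:Int) < 10 ^ k := pow_pos (by norm_num) k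
    calc (10:Int) ^ k < 10 ^ k * 10 := by nlinarith
    _ = 10 ^ (k + 1) := (pow_succ 10 k).symm
  omega

-- Source B's 'sum(n // 10 ** i % 10 * 10 ** (k - 1 - i) for i in range(k))';
-- the exponents i and k - 1 - i are nonnegative throughout the range, so '.toNat' is exact here
def pvRevB (n : Int) : Int :=
  let k := pvCountK n 1
  (PySem.List.pyRange 0 k 1).foldl
    (fun acc i =>
      acc + PySem.Int.mod (PySem.Int.floordiv n ((10:Int) ^ i.toNat)) 10 * (10:Int) ^ (k - 1 - i).toNat)
    0

def checkAdamOrNot_alt (N : Int) : String :=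
  let r := pvRevB N
  if N * N = pvRevB (r * r) then "YES" else "NO"

-- ===== PRECONDITION & SPEC =====
-- A's first while-loop never terminates for N < 0 (N // 10 stalls at -1), so A returns exactly on 0 ≤ N.
def Pre_checkAdamOrNot (N : Int) : Prop := 0 ≤ N
instance (N : Int) : Decidable (Pre_checkAdamOrNot N) := by unfold Pre_checkAdamOrNot; infer_instance
def pvWitness_checkAdamOrNot : Int := (12)

def Spec_checkAdamOrNot (N : Int) (out : String) : Prop := out = checkAdamOrNot_alt N
instance (N : Int) (out : String) : Decidable (Spec_checkAdamOrNot N out) := by unfold Spec_checkAdamOrNot; infer_instance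

-- ===== CLAIM (what is proved, stated in full; the proofs are below) =====
def Claim_equal_checkAdamOrNot : Prop := ∀ (N : Int), Dom_checkAdamOrNot N → Pre_checkAdamOrNot N → Spec_checkAdamOrNot N (checkAdamOrNot N)

-- ===== LEMMAS AND PROOFS =====

-- number of decimal digits (0 for 0)
def pvNd (m : Nat) : Nat := if m = 0 then 0 else pvNd (m / 10) + 1
decreasing_by exact Nat.div_lt_self (Nat.pos_of_ne_zero (by assumption)) (by norm_num)

-- arithmetic digit reversal on Nat
def pvRevD (m : Nat) : Nat := if m = 0 then 0 else m % 10 * 10 ^ pvNd (m / 10) + pvRevD (m / 10)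
decreasing_by exact Nat.div_lt_self (Nat.pos_of_ne_zero (by assumption)) (by norm_num)

lemma pvNd_pos_eq (m : Nat) (hm : m ≠ 0) : pvNd m = pvNd (m / 10) + 1 := by
  rw [pvNd, if_neg hm]

lemma pvRevD_pos_eq (m : Nat) (hm : m ≠ 0) :
    pvRevD m = m % 10 * 10 ^ pvNd (m / 10) + pvRevD (m / 10) := by
  rw [pvRevD, if_neg hm]

lemma pvNd_eq_zero_iff (m : Nat) : pvNd m = 0 ↔ m = 0 := by
  constructor
  · intro h; by_contra hm; rw [pvNd, if_neg hm] at h; omega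
  · intro h; subst h; rw [pvNd]; simp

lemma pvNd_lt (m : Nat) : m < 10 ^ pvNd m := by
  induction m using Nat.strong_induction_on with
  | _ m ih =>
    by_cases hm : m = 0
    · subst hm; rw [pvNd]; simp
    · rw [pvNd, if_neg hm, pow_succ]
      have := ih (m / 10) (Nat.div_lt_self (Nat.pos_of_ne_zero hm) (by norm_num))
      omega

lemma pvNd_le (m : Nat) (hm : 0 < m) : 10 ^ (pvNd m - 1) ≤ m := by
  induction m using Nat.strong_induction_on with
  | _ m ih =>
    rw [pvNd, if_neg (by omega)]
    by_cases h10 : m / 10 = 0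
    · simp [h10, pvNd]; omega
    · have hpos : 0 < m / 10 := Nat.pos_of_ne_zero h10
      have ih' := ih (m / 10) (Nat.div_lt_self hm (by norm_num)) hpos
      have hnd : 0 < pvNd (m / 10) := by
        rcases Nat.eq_zero_or_pos (pvNd (m / 10)) with h | h
        · exact absurd ((pvNd_eq_zero_iff _).mp h) h10
        · exact h
      have : 10 ^ (pvNd (m / 10) + 1 - 1) = 10 * 10 ^ (pvNd (m / 10) - 1) := by
        rw [Nat.add_sub_cancel, ← pow_succ']
        congr 1
        omega
      rw [this]
      omega

-- A's loop computes the arithmetic reversal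
lemma pvRevLoop_eq (m : Nat) : ∀ acc : Int, pvRevLoop (m : Int) acc = acc * 10 ^ pvNd m + (pvRevD m : Int) := by
  induction m using Nat.strong_induction_on with
  | _ m ih =>
    intro acc
    by_cases hm : m = 0
    · subst hm
      rw [pvRevLoop, pvNd, pvRevD]
      simp
    · rw [pvRevLoop, if_pos (by exact_mod_cast Nat.pos_of_ne_zero hm)]
      have hfd : PySem.Int.floordiv (m : Int) 10 = ((m / 10 : Nat) : Int) :=
        PySem.Int.floordiv_natCast m 10
      have hmd : PySem.Int.mod (m : Int) 10 = ((m % 10 : Nat) : Int) :=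
        PySem.Int.mod_natCast m 10
      rw [hfd, hmd, ih (m / 10) (Nat.div_lt_self (Nat.pos_of_ne_zero hm) (by norm_num))]
      rw [pvNd_pos_eq m hm, pvRevD_pos_eq m hm]
      push_cast
      ring

-- pvCountK finds max k (pvNd m)
lemma pvCountK_eq (m k : Nat) : pvCountK (m : Int) k = (max k (pvNd m) : Nat) := by
  by_cases hm : m = 0
  · subst hm
    rw [pvCountK, if_neg (by simp only [Nat.cast_zero, not_le]; positivity), pvNd]
    simp
  · have hlt := pvNd_lt m
    have hle := pvNd_le m (Nat.pos_of_ne_zero hm)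
    by_cases hk : pvNd m ≤ k
    · rw [pvCountK, if_neg]
      · congr 1; omega
      · rw [not_le]
        calc (m : Int) < ((10 ^ pvNd m : Nat) : Int) := by exact_mod_cast hlt
          _ ≤ ((10 ^ k : Nat) : Int) := by
              exact_mod_cast Nat.pow_le_pow_right (by norm_num) hk
          _ = (10 : Int) ^ k := by push_cast; ring
    · -- k < pvNd m : one more step
      have hstep : (10:Int) ^ k ≤ (m : Int) := by
        calc (10:Int) ^ k = ((10 ^ k : Nat) : Int) := by push_cast; ring
          _ ≤ ((10 ^ (pvNd m - 1) : Nat) : Int) := by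
              exact_mod_cast Nat.pow_le_pow_right (by norm_num) (by omega)
          _ ≤ (m : Int) := by exact_mod_cast hle
      rw [pvCountK, if_pos hstep, pvCountK_eq m (k + 1)]
      congr 1
      omega
termination_by pvNd m - k
decreasing_by omega

-- the positional Nat sum
def pvTn (m K : Nat) : Nat := ((List.range K).map (fun j => m / 10 ^ j % 10 * 10 ^ (K - 1 - j))).sum

lemma pvTn_eq (K : Nat) : ∀ m : Nat, pvNd m ≤ K → pvTn m K = pvRevD m * 10 ^ (K - pvNd m) := by
  induction K with
  | zero =>
    intro m hm
    have : m = 0 := (pvNd_eq_zero_iff m).mp (by omega)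
    subst this
    rw [pvRevD]
    simp [pvTn]
  | succ K ih =>
    intro m hm
    have hpeel : pvTn m (K + 1) = m % 10 * 10 ^ K + pvTn (m / 10) K := by
      rw [pvTn, List.range_succ_eq_map]
      simp only [List.map_cons, List.sum_cons, List.map_map]
      congr 1
      · simp
      · rw [pvTn]
        congr 1
        apply List.map_congr_left
        intro j hj
        simp only [Function.comp_apply]
        rw [Nat.div_div_eq_div_mul]
        congr 2
        · rw [pow_succ']
        · omega
    by_cases hm0 : m = 0
    · subst hm0
      have h0 : (0:Nat) / 10 = 0 := by norm_num
      rw [hpeel, h0, ih 0 (by rw [pvNd]; simp), pvRevD]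
      simp
    · rw [hpeel]
      have hnd : pvNd m = pvNd (m / 10) + 1 := pvNd_pos_eq m hm0
      have hle : pvNd (m / 10) ≤ K := by omega
      rw [ih (m / 10) hle, pvRevD_pos_eq m hm0, hnd]
      have hK : K = pvNd (m / 10) + (K - pvNd (m / 10)) := by omega
      have hK2 : K + 1 - (pvNd (m / 10) + 1) = K - pvNd (m / 10) := by omega
      rw [hK2]
      calc m % 10 * 10 ^ K + pvRevD (m / 10) * 10 ^ (K - pvNd (m / 10))
          = m % 10 * (10 ^ (pvNd (m / 10)) * 10 ^ (K - pvNd (m / 10)))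
            + pvRevD (m / 10) * 10 ^ (K - pvNd (m / 10)) := by
            rw [← pow_add, ← hK]
        _ = (m % 10 * 10 ^ pvNd (m / 10) + pvRevD (m / 10)) * 10 ^ (K - pvNd (m / 10)) := by ring

-- B's fold equals the Nat positional sum at K = max 1 (pvNd m)
lemma pvRevB_eq_Tn (m : Nat) : pvRevB (m : Int) = (pvTn m (max 1 (pvNd m)) : Int) := by
  simp only [pvRevB]
  rw [pvCountK_eq m 1, PySem.List.pyRange_zero_natCast, List.foldl_map, pvTn]
  rw [PySem.List.foldl_add (g := fun j : Nat =>
    PySem.Int.mod (PySem.Int.floordiv (m : Int) ((10:Int) ^ ((j : Int)).toNat)) 10 *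
      (10:Int) ^ (((max 1 (pvNd m) : Nat) : Int) - 1 - (j : Int)).toNat), zero_add]
  have hmap : (List.range (max 1 (pvNd m))).map (fun j : Nat =>
        PySem.Int.mod (PySem.Int.floordiv (m : Int) ((10:Int) ^ ((j : Int)).toNat)) 10 *
          (10:Int) ^ (((max 1 (pvNd m) : Nat) : Int) - 1 - (j : Int)).toNat)
      = (List.range (max 1 (pvNd m))).map
          (fun j => ((m / 10 ^ j % 10 * 10 ^ (max 1 (pvNd m) - 1 - j) : Nat) : Int)) := by
    apply List.map_congr_left
    intro j hj
    have hj' : j < max 1 (pvNd m) := List.mem_range.mp hj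
    have h1 : ((j : Int)).toNat = j := by simp
    have h2 : ((((max 1 (pvNd m) : Nat)) : Int) - 1 - (j : Int)).toNat = max 1 (pvNd m) - 1 - j := by
      omega
    rw [h1, h2]
    have h3 : (10:Int) ^ j = ((10 ^ j : Nat) : Int) := by push_cast; ring
    have h4 : PySem.Int.mod ((m / 10 ^ j : Nat) : Int) 10 = ((m / 10 ^ j % 10 : Nat) : Int) := by
      exact_mod_cast PySem.Int.mod_natCast (m / 10 ^ j) 10
    rw [h3, PySem.Int.floordiv_natCast, h4]
    push_cast
    ring
  rw [hmap, Nat.cast_list_sum, List.map_map]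
  rfl


lemma pvRevB_eq (m : Nat) : pvRevB (m : Int) = (pvRevD m : Int) := by
  rw [pvRevB_eq_Tn]
  have h0 : pvNd 0 = 0 := by rw [pvNd]; simp
  have hr0 : pvRevD 0 = 0 := by rw [pvRevD]; simp
  by_cases hm : m = 0
  · subst hm
    norm_num [pvTn, h0, hr0]
  · have hnd : 0 < pvNd m := by
      rcases Nat.eq_zero_or_pos (pvNd m) with h | h
      · exact absurd ((pvNd_eq_zero_iff m).mp h) hm
      · exact h
    have : max 1 (pvNd m) = pvNd m := by omega
    rw [this, pvTn_eq (pvNd m) m (le_refl _)]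
    simp

-- ===== VERDICT (by name: the statement is the Claim_ definition above) =====
theorem checkAdamOrNot_spec : Claim_equal_checkAdamOrNot := by
  intro N _ hpre
  obtain ⟨m, rfl⟩ := Int.eq_ofNat_of_zero_le hpre
  unfold Spec_checkAdamOrNot
  simp only [checkAdamOrNot, checkAdamOrNot_alt]
  have harg : ((pvRevD m : Int) * (pvRevD m : Int)) = ((pvRevD m * pvRevD m : Nat) : Int) := by
    push_cast; ring
  rw [pvRevLoop_eq m 0, pvRevB_eq m, zero_mul, zero_add, harg, pvRevLoop_eq _ 0, pvRevB_eq,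
    zero_mul, zero_add]
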